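-- pv_equiv track=rewrite | github.com/tianzedong/regulatory-compliance-processor | src/vector_db.py | assign_unique_ids
-- ===== SOURCE A (Python) =====
-- from collections import defaultdict
-- from typing import List, Dict
--
-- def assign_unique_ids(clauses: List[Dict]) -> List[Dict]:
--     """
--     For each clause, combine doc_id + id into a base_id, then if repeated,
--     append a numeric suffix: e.g., 'DOC-1.1-2' for a 2nd occurrence in the same dataset.
--     Updates clauses in place, returns the same list.
--     """
--     id_counter = defaultdict(int)
--     for clause in clauses:
--         base_id = f"{clause['doc_id']}-{clause['id']}"
--         id_counter[base_id] += 1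
--         # If first occurrence, stable_id = base_id
--         if id_counter[base_id] == 1:
--             clause["stable_id"] = base_id
--         else:
--             # Append suffix for repeated base_id
--             clause["stable_id"] = f"{base_id}-{id_counter[base_id]}"
--     return clauses
-- ===== SOURCE B (Python) =====
-- def assign_unique_ids(clauses):
--     """
--     Two-phase grouping: first build an ordered table mapping each base_id to the
--     list of positions of the clauses sharing it, then walk each group assigning
--     the base_id to its first member and 'base_id-k' to the k-th (k >= 2).
--     Updates clauses in place, returns the same list.
--     """
--     groups = {}
--     for i, clause in enumerate(clauses):
--         groups.setdefault(f"{clause['doc_id']}-{clause['id']}", []).append(i)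
--     for base_id, idxs in groups.items():
--         for k, i in enumerate(idxs):
--             clauses[i]["stable_id"] = base_id if k == 0 else f"{base_id}-{k + 1}"
--     return clauses
-- ===== Notes on version B (the rewrite author's own statement) =====
-- stated objective: alternative
-- what changed: Replaces A's single-pass streaming running-counter with a two-phase grouping: a first pass builds an ordered table mapping each base_id to the list of positions of the clauses sharing it, and a second pass enumerates each group, writing base_id to its first member and 'base_id-k' to the k-th.
import Mathlib
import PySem

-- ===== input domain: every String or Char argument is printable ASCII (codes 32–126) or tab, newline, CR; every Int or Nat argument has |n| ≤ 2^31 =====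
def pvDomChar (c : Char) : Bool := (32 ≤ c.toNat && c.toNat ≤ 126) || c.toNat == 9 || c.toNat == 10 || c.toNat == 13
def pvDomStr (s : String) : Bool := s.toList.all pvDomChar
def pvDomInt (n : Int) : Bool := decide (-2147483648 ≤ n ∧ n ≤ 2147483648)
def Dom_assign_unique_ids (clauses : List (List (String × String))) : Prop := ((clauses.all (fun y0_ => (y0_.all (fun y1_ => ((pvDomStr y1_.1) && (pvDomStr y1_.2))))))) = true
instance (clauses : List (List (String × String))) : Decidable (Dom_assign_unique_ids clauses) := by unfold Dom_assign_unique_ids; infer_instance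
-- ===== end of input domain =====

-- B replaces A's streaming running-counter loop by a two-phase grouping: first pass
-- builds an ordered table base_id -> list of positions, second pass enumerates each
-- group writing the suffix at each position (alternative decomposition, same results).
-- Both Pythons mutate the clause dicts in place and return the same list object; the
-- equivalence proved here is about the returned value.

-- shared Python dict-access helpers (clause dicts have unique keys; first match):
-- clause[k] (totalised with ""; Pre_ guarantees the key is present where A/B read)
def pvGetKey (c : List (String × String)) (k : String) : String :=
  (((c.find? (fun p => p.1 == k)).map (fun p => p.2)).getD "")

-- clause[k] = v : overwrite in place if present, else append (Python dict assignment)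
def pvSetKey (c : List (String × String)) (k v : String) : List (String × String) :=
  if c.any (fun p => p.1 == k) then c.map (fun p => if p.1 == k then (k, v) else p)
  else c ++ [(k, v)]

def pvBaseId (c : List (String × String)) : String :=
  pvGetKey c "doc_id" ++ "-" ++ pvGetKey c "id"

-- ===== PORT A =====
def assign_unique_ids (clauses : List (List (String × String))) : List (List (String × String)) :=
  (clauses.foldl
    (fun (st : PySem.Dict String Int × List (List (String × String))) clause =>
      let base_id := pvBaseId clause
      let cnt := st.1.getD base_id 0 + 1
      let d := st.1.insert base_id cnt
      let clause' :=
        if cnt = 1 then pvSetKey clause "stable_id" base_id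
        else pvSetKey clause "stable_id" (base_id ++ "-" ++ PySem.Int.toStr cnt)
      (d, st.2 ++ [clause']))
    (PySem.Dict.empty, [])).2

-- ===== PORT B =====
def assign_unique_ids_alt (clauses : List (List (String × String))) : List (List (String × String)) :=
  -- groups.setdefault(base_id, []).append(i)  =  d[k] = d.get(k, []) + [i]  (Dict.modify)
  let groups : PySem.Dict String (List Int) :=
    (PySem.List.enumerate clauses 0).foldl
      (fun d p => d.modify (pvBaseId p.2) [] (fun v => v ++ [p.1])) PySem.Dict.empty
  -- for base_id, idxs in groups.items(): for k, i in enumerate(idxs): clauses[i][...] = ...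
  groups.items.foldl
    (fun acc pr =>
      (PySem.List.enumerate pr.2 0).foldl
        (fun acc q =>
          -- clauses[i]["stable_id"] = …; q.2 is a position recorded by the first
          -- pass, hence a valid non-negative index: toNat + List.modify is exact
          acc.modify q.2.toNat
            (fun c => pvSetKey c "stable_id"
              (if q.1 == 0 then pr.1 else pr.1 ++ "-" ++ PySem.Int.toStr (q.1 + 1))))
        acc)
    clauses

-- ===== PRECONDITION & SPEC =====
-- Pre_ excludes exactly the clauses on which Python A raises KeyError: a clause dict
-- missing the "doc_id" or "id" key (B raises there too).
def Pre_assign_unique_ids (clauses : List (List (String × String))) : Prop :=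
  (clauses.all (fun c => c.any (fun p => p.1 == "doc_id") && c.any (fun p => p.1 == "id"))) = true
instance (clauses : List (List (String × String))) : Decidable (Pre_assign_unique_ids clauses) := by
  unfold Pre_assign_unique_ids; infer_instance

def pvWitness_assign_unique_ids : (List (List (String × String))) :=
  [[("doc_id", "DOC"), ("id", "1.1")], [("doc_id", "DOC"), ("id", "1.1")]]

def Spec_assign_unique_ids (clauses : List (List (String × String))) (out : List (List (String × String))) : Prop := out = assign_unique_ids_alt clauses
instance (clauses : List (List (String × String))) (out : List (List (String × String))) : Decidable (Spec_assign_unique_ids clauses out) := by unfold Spec_assign_unique_ids; infer_instance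

-- ===== CLAIM (what is proved, stated in full; the proofs are below) =====
def Claim_equal_assign_unique_ids : Prop := ∀ (clauses : List (List (String × String))), Dom_assign_unique_ids clauses → Pre_assign_unique_ids clauses → Spec_assign_unique_ids clauses (assign_unique_ids clauses)

-- ===== LEMMAS AND PROOFS =====

-- the suffix written for the (k+1)-st occurrence of a base id
def pvLabel (b : String) (k : Nat) : String :=
  if k = 0 then b else b ++ "-" ++ PySem.Int.toStr ((k : Int) + 1)

-- intermediate form of A: process the rest given the base ids pb of the prefix
def pvAssignFrom (pb : List String) : List (List (String × String)) → List (List (String × String))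
  | [] => []
  | c :: rs =>
    pvSetKey c "stable_id" (pvLabel (pvBaseId c) (pb.count (pvBaseId c)))
      :: pvAssignFrom (pb ++ [pvBaseId c]) rs

lemma a_fold_eq (rest : List (List (String × String))) :
    ∀ (pb : List String) (d : PySem.Dict String Int) (acc : List (List (String × String))),
    (∀ b, d.getD b 0 = (pb.count b : Int)) →
    (rest.foldl
      (fun (st : PySem.Dict String Int × List (List (String × String))) clause =>
        let base_id := pvBaseId clause
        let cnt := st.1.getD base_id 0 + 1
        let d := st.1.insert base_id cnt
        let clause' :=
          if cnt = 1 then pvSetKey clause "stable_id" base_id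
          else pvSetKey clause "stable_id" (base_id ++ "-" ++ PySem.Int.toStr cnt)
        (d, st.2 ++ [clause'])) (d, acc)).2 = acc ++ pvAssignFrom pb rest := by
  induction rest with
  | nil => intro pb d acc _; simp [pvAssignFrom]
  | cons c rs ih =>
    intro pb d acc hinv
    simp only [List.foldl_cons]
    have hc : d.getD (pvBaseId c) 0 + 1 = ((pb.count (pvBaseId c) : Int) + 1) := by
      rw [hinv]
    rw [ih (pb ++ [pvBaseId c]) _ _ (by
      intro b
      by_cases hb : pvBaseId c = b
      · subst hb
        simp [hinv, List.count_append]
      · simp only [PySem.Dict.getD_insert, hinv, List.count_append]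
        have hb' : ¬ b = pvBaseId c := fun h => hb h.symm
        simp [List.count_eq_zero, hb'])]
    simp only [pvAssignFrom, pvLabel, hc]
    by_cases h0 : pb.count (pvBaseId c) = 0
    · simp [h0]
    · have h1 : ¬ ((pb.count (pvBaseId c) : Int) + 1 = 1) := by
        simp; omega
      simp [h0, h1]

-- pointwise characterisation of pvAssignFrom
lemma assignFrom_getElem? (cs : List (List (String × String))) :
    ∀ (pb : List String) (i : Nat),
    (pvAssignFrom pb cs)[i]? = cs[i]?.map (fun c =>
      pvSetKey c "stable_id"
        (pvLabel (pvBaseId c) (pb.count (pvBaseId c) + ((cs.map pvBaseId).take i).count (pvBaseId c)))) := by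
  induction cs with
  | nil => intro pb i; simp [pvAssignFrom]
  | cons c rs ih =>
    intro pb i
    cases i with
    | zero => simp [pvAssignFrom]
    | succ j =>
      simp only [pvAssignFrom, List.getElem?_cons_succ, List.map_cons, List.take_succ_cons]
      rw [ih (pb ++ [pvBaseId c]) j]
      cases hj : rs[j]? with
      | none => simp
      | some c' =>
        simp only [Option.map_some]
        have : (pb ++ [pvBaseId c]).count (pvBaseId c') + ((rs.map pvBaseId).take j).count (pvBaseId c')
            = pb.count (pvBaseId c') + ((pvBaseId c :: (rs.map pvBaseId).take j).count (pvBaseId c')) := by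
          simp [List.count_append, List.count_cons]
          omega
        rw [this]

-- B's second pass on one group, Nat indices, running occurrence number k
def writeG (b : String) : List Nat → Nat → List (List (String × String)) → List (List (String × String))
  | [], _, acc => acc
  | i :: rest, k, acc =>
    writeG b rest (k + 1) (acc.modify i (fun c => pvSetKey c "stable_id" (pvLabel b k)))

-- the positions (counted from s) of the clauses whose base id is b
def pvIdxsFrom (cs : List (List (String × String))) (s : Nat) (b : String) : List Nat :=
  ((cs.zipIdx s).filter (fun q => pvBaseId q.1 == b)).map (fun q => q.2)

lemma mem_pvIdxsFrom (cs : List (List (String × String))) :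
    ∀ (s : Nat) (b : String) (i : Nat),
    i ∈ pvIdxsFrom cs s b ↔ ∃ (k : Nat) (h : k < cs.length), i = s + k ∧ pvBaseId cs[k] = b := by
  induction cs with
  | nil => intro s b i; simp [pvIdxsFrom]
  | cons c rs ih =>
    intro s b i
    simp only [pvIdxsFrom, List.zipIdx_cons, List.filter_cons]
    by_cases hb : pvBaseId c = b
    · simp only [hb, beq_self_eq_true, if_true, List.map_cons, List.mem_cons]
      rw [show ((rs.zipIdx (s+1)).filter (fun q => pvBaseId q.1 == b)).map (fun q => q.2) = pvIdxsFrom rs (s+1) b from rfl, ih]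
      constructor
      · rintro (rfl | ⟨k, hk, rfl, hbk⟩)
        · exact ⟨0, by simp, by simp, by simpa using hb⟩
        · exact ⟨k + 1, by simpa using hk, by omega, by simpa using hbk⟩
      · rintro ⟨k, hk, rfl, hbk⟩
        cases k with
        | zero => exact Or.inl (by simp)
        | succ j => exact Or.inr ⟨j, by simpa using hk, by omega, by simpa using hbk⟩
    · have hb' : (pvBaseId c == b) = false := by simp [hb]
      simp only [hb', Bool.false_eq_true, if_false]
      rw [show ((rs.zipIdx (s+1)).filter (fun q => pvBaseId q.1 == b)).map (fun q => q.2) = pvIdxsFrom rs (s+1) b from rfl, ih]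
      constructor
      · rintro ⟨k, hk, rfl, hbk⟩
        exact ⟨k + 1, by simpa using hk, by omega, by simpa using hbk⟩
      · rintro ⟨k, hk, rfl, hbk⟩
        cases k with
        | zero => exact absurd (by simpa using hbk) hb
        | succ j => exact ⟨j, by simpa using hk, by omega, by simpa using hbk⟩

lemma le_of_mem_pvIdxsFrom (cs : List (List (String × String))) (s : Nat) (b : String)
    (i : Nat) (h : i ∈ pvIdxsFrom cs s b) : s ≤ i := by
  obtain ⟨k, _, rfl, _⟩ := (mem_pvIdxsFrom cs s b i).1 h
  omega

lemma nodup_pvIdxsFrom (cs : List (List (String × String))) :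
    ∀ (s : Nat) (b : String), (pvIdxsFrom cs s b).Nodup := by
  induction cs with
  | nil => intro s b; simp [pvIdxsFrom]
  | cons c rs ih =>
    intro s b
    simp only [pvIdxsFrom, List.zipIdx_cons, List.filter_cons]
    by_cases hb : (pvBaseId c == b) = true
    · simp only [hb, if_true, List.map_cons]
      refine List.Nodup.cons (fun hmem => ?_) (ih (s+1) b)
      have := le_of_mem_pvIdxsFrom rs (s+1) b s hmem
      omega
    · simp only [Bool.not_eq_true] at hb
      simp only [hb, Bool.false_eq_true, if_false]
      exact ih (s+1) b

lemma idxOf_pvIdxsFrom (cs : List (List (String × String))) :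
    ∀ (s : Nat) (b : String) (k : Nat) (hk : k < cs.length), pvBaseId cs[k] = b →
    (pvIdxsFrom cs s b).idxOf (s + k) = ((cs.take k).map pvBaseId).count b := by
  induction cs with
  | nil => intro s b k hk; simp at hk
  | cons c rs ih =>
    intro s b k hk hbk
    simp only [pvIdxsFrom, List.zipIdx_cons, List.filter_cons]
    by_cases hb : pvBaseId c = b
    · simp only [hb, beq_self_eq_true, if_true, List.map_cons]
      cases k with
      | zero => simp
      | succ j =>
        have hne : (s == s + (j + 1)) = false := by rw [beq_eq_false_iff_ne]; omega
        rw [List.idxOf_cons]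
        simp only [hne, cond_false]
        have : s + (j + 1) = (s + 1) + j := by omega
        rw [this, show ((rs.zipIdx (s+1)).filter (fun q => pvBaseId q.1 == b)).map (fun q => q.2) = pvIdxsFrom rs (s+1) b from rfl,
          ih (s+1) b j (by simpa using hk) (by simpa using hbk)]
        simp [hb]
    · have hb' : (pvBaseId c == b) = false := by simp [hb]
      simp only [hb', Bool.false_eq_true, if_false]
      cases k with
      | zero => exact absurd (by simpa using hbk) hb
      | succ j =>
        have : s + (j + 1) = (s + 1) + j := by omega
        rw [this, show ((rs.zipIdx (s+1)).filter (fun q => pvBaseId q.1 == b)).map (fun q => q.2) = pvIdxsFrom rs (s+1) b from rfl,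
          ih (s+1) b j (by simpa using hk) (by simpa using hbk)]
        simp [hb]

-- pointwise effect of writeG on a group with distinct indices
lemma writeG_getElem? (b : String) :
    ∀ (ks : List Nat) (k0 : Nat) (acc : List (List (String × String))) (i : Nat), ks.Nodup →
    (writeG b ks k0 acc)[i]? =
      if i ∈ ks then acc[i]?.map (fun c => pvSetKey c "stable_id" (pvLabel b (k0 + ks.idxOf i)))
      else acc[i]? := by
  intro ks
  induction ks with
  | nil => intro k0 acc i _; simp [writeG]
  | cons j rest ih =>
    intro k0 acc i hnd
    have hnd' := hnd.of_cons
    have hj : j ∉ rest := (List.nodup_cons.1 hnd).1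
    simp only [writeG]
    rw [ih (k0 + 1) _ i hnd']
    by_cases hij : i = j
    · subst hij
      have : i ∉ rest := hj
      simp only [this, if_false, List.mem_cons, true_or, if_true]
      rw [List.getElem?_modify]
      cases acc[i]? with
      | none => simp
      | some c => simp
    · have hm : (acc.modify j (fun c => pvSetKey c "stable_id" (pvLabel b k0)))[i]? = acc[i]? := by
        rw [List.getElem?_modify]
        cases acc[i]? with
        | none => simp
        | some c => simp [Ne.symm hij]
      by_cases hmem : i ∈ rest
      · have : i ∈ j :: rest := List.mem_cons_of_mem _ hmem
        simp only [hmem, if_true, this, if_true, hm]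
        have hji : (j == i) = false := by simp [Ne.symm hij]
        rw [List.idxOf_cons]
        simp only [hji, cond_false]
        have harith : k0 + 1 + List.idxOf i rest = k0 + (List.idxOf i rest + 1) := by omega
        rw [harith]
      · have : i ∉ j :: rest := by simp [hij, hmem]
        simp only [hmem, if_false, this, if_false, hm]

-- the inner Int-enumerate fold of port B is writeG on the Nat index list
lemma inner_eq_writeG (b : String) :
    ∀ (ks : List Nat) (s : Nat) (acc : List (List (String × String))),
    ((PySem.List.enumerate (ks.map Int.ofNat) (s : Int)).foldl
      (fun acc q =>
        acc.modify q.2.toNat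
          (fun c => pvSetKey c "stable_id"
            (if q.1 == 0 then b else b ++ "-" ++ PySem.Int.toStr (q.1 + 1))))
      acc) = writeG b ks s acc := by
  intro ks
  induction ks with
  | nil => intro s acc; simp [PySem.List.enumerate_nil, writeG]
  | cons i rest ih =>
    intro s acc
    rw [List.map_cons, PySem.List.enumerate_cons, List.foldl_cons]
    have hcast : ((s : Int) + 1) = ((s + 1 : Nat) : Int) := by push_cast; ring
    rw [hcast, ih (s + 1)]
    simp only [writeG]
    congr 1
    have h0 : ((s : Int) == 0) = (decide (s = 0)) := by
      by_cases hs : s = 0 <;> simp [hs]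
    have h1 : ((s : Int) + 1) = (((s + 1 : Nat) : Int)) := hcast
    simp only [h0, pvLabel]
    by_cases hs : s = 0
    · simp [hs]
    · simp [hs]

-- the index list of the b-group built by port B's first pass
lemma groups_getD (clauses : List (List (String × String))) (b : String) :
    ((PySem.List.enumerate clauses 0).foldl
      (fun d p => d.modify (pvBaseId p.2) [] (fun v => v ++ [p.1])) PySem.Dict.empty).getD b []
    = (pvIdxsFrom clauses 0 b).map Int.ofNat := by
  have h1 : (PySem.List.enumerate clauses 0).foldl
      (fun d p => d.modify (pvBaseId p.2) [] (fun v => v ++ [p.1])) PySem.Dict.empty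
      = ((PySem.List.enumerate clauses 0).map (fun p => (pvBaseId p.2, p.1))).foldl
        (fun d q => d.modify q.1 [] (fun v => v ++ [q.2])) PySem.Dict.empty := by
    rw [List.foldl_map]
  rw [h1, PySem.Dict.getD_foldl_modify_append]
  simp only [PySem.Dict.getD_empty, List.nil_append]
  rw [List.filter_map]
  have h2 : ((fun p => p.1 == b) ∘ (fun p => (pvBaseId (p.2 : List (String × String)), (p.1 : Int))))
      = fun (p : Int × List (String × String)) => pvBaseId p.2 == b := rfl
  rw [h2, List.map_map]
  rw [PySem.List.enumerate_eq_zipIdx_map, List.filter_map, List.map_map]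
  have h3 : ((fun p => pvBaseId p.2 == b) ∘ (fun (p : List (String × String) × Nat) => ((0 : Int) + ↑p.2, p.1)))
      = fun (q : List (String × String) × Nat) => pvBaseId q.1 == b := rfl
  rw [h3]
  simp only [pvIdxsFrom, List.map_map]
  congr 1
  funext q
  simp

-- the untouched case: no group in K writes position i
lemma outer_untouched (clauses : List (List (String × String))) :
    ∀ (K : List String) (acc : List (List (String × String))) (i : Nat),
    (∀ c, clauses[i]? = some c → pvBaseId c ∉ K) →
    (K.foldl (fun acc b => writeG b (pvIdxsFrom clauses 0 b) 0 acc) acc)[i]? = acc[i]? := by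
  intro K
  induction K with
  | nil => intro acc i _; simp
  | cons b rest ih =>
    intro acc i hK
    rw [List.foldl_cons, ih _ i (fun c hc => fun hmem => hK c hc (List.mem_cons_of_mem _ hmem))]
    rw [writeG_getElem? b _ 0 acc i (nodup_pvIdxsFrom clauses 0 b)]
    have : i ∉ pvIdxsFrom clauses 0 b := by
      intro hmem
      obtain ⟨k, hk, hik, hbk⟩ := (mem_pvIdxsFrom clauses 0 b i).1 hmem
      have hi : clauses[i]? = some clauses[k] := by
        subst hik; simp [hk]
      exact hK _ hi (by simp [hbk])
    simp [this]

-- the written case: the group of clauses[i]'s base writes exactly its rank there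
lemma outer_written (clauses : List (List (String × String))) :
    ∀ (K : List String), K.Nodup →
    ∀ (acc : List (List (String × String))) (i : Nat) (c : List (String × String)),
    clauses[i]? = some c → pvBaseId c ∈ K →
    (K.foldl (fun acc b => writeG b (pvIdxsFrom clauses 0 b) 0 acc) acc)[i]? =
      acc[i]?.map (fun c' => pvSetKey c' "stable_id"
        (pvLabel (pvBaseId c) (((clauses.take i).map pvBaseId).count (pvBaseId c)))) := by
  intro K
  induction K with
  | nil => intro _ acc i c _ hmem; simp at hmem
  | cons b rest ih =>
    intro hnd acc i c hc hmem
    obtain ⟨hi, hci⟩ := List.getElem?_eq_some_iff.1 hc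
    rw [List.foldl_cons]
    by_cases hbc : pvBaseId c = b
    · -- this group writes i; the remaining groups leave it alone
      have hrest : pvBaseId c ∉ rest := by
        rw [hbc]; exact (List.nodup_cons.1 hnd).1
      rw [outer_untouched clauses rest _ i (fun c' hc' => by
        rw [hc] at hc'
        rw [← Option.some.inj hc']
        exact hrest)]
      rw [writeG_getElem? b _ 0 acc i (nodup_pvIdxsFrom clauses 0 b)]
      have himem : i ∈ pvIdxsFrom clauses 0 b := by
        rw [mem_pvIdxsFrom]
        exact ⟨i, hi, by omega, by rw [hci, hbc]⟩
      have hidx : (pvIdxsFrom clauses 0 b).idxOf i = ((clauses.take i).map pvBaseId).count b := by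
        have := idxOf_pvIdxsFrom clauses 0 b i hi (by rw [hci, hbc])
        simpa using this
      simp [himem, hidx, hbc]
    · -- some later group writes i
      have hmem' : pvBaseId c ∈ rest := by
        cases List.mem_cons.1 hmem with
        | inl h => exact absurd h hbc
        | inr h => exact h
      rw [ih hnd.of_cons _ i c hc hmem']
      rw [writeG_getElem? b _ 0 acc i (nodup_pvIdxsFrom clauses 0 b)]
      have : i ∉ pvIdxsFrom clauses 0 b := by
        intro hm
        obtain ⟨k, hk, hik, hbk⟩ := (mem_pvIdxsFrom clauses 0 b i).1 hm
        apply hbc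
        have : clauses[k] = c := by
          have h1 : clauses[i]? = some clauses[k] := by subst hik; simp [hk]
          rw [hc] at h1
          exact Option.some.inj h1.symm
        rw [← this, hbk]
      simp [this]

-- port B computed as the outer fold over the distinct base ids
lemma alt_eq_keys_fold (clauses : List (List (String × String))) :
    assign_unique_ids_alt clauses =
      (PySem.Set.ofList (clauses.map pvBaseId)).foldl
        (fun acc b => writeG b (pvIdxsFrom clauses 0 b) 0 acc) clauses := by
  unfold assign_unique_ids_alt
  simp only []
  set G := (PySem.List.enumerate clauses 0).foldl
      (fun d p => d.modify (pvBaseId p.2) [] (fun v => v ++ [p.1])) PySem.Dict.empty with hG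
  have hmap : (PySem.List.enumerate clauses 0).map (fun p => pvBaseId p.2)
      = clauses.map pvBaseId := by
    rw [show (fun (p : Int × List (String × String)) => pvBaseId p.2)
          = pvBaseId ∘ (fun p => p.2) from rfl, ← List.map_map, PySem.List.map_snd_enumerate]
  have hkeys : G.keys = PySem.Set.ofList (clauses.map pvBaseId) := by
    have hk := PySem.Dict.keys_foldl_modify_key (PySem.List.enumerate clauses 0)
      (fun p => pvBaseId p.2) ([] : List Int) (fun _ p v => v ++ [p.1]) PySem.Dict.empty
    rw [PySem.Dict.keys_empty, hmap] at hk
    exact hk.trans (PySem.Set.ofList_eq_foldl _).symm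
  have hnd : G.keys.Nodup :=
    PySem.Dict.nodup_keys_foldl_modify_key (PySem.List.enumerate clauses 0)
      (fun p => pvBaseId p.2) ([] : List Int) (fun _ p v => v ++ [p.1]) PySem.Dict.empty (by simp)
  rw [PySem.Dict.items_eq_map_keys G hnd [], List.foldl_map, hkeys]
  apply PySem.List.foldl_congr_mem
  intro acc b _
  simp only []
  rw [show G.getD b [] = (pvIdxsFrom clauses 0 b).map Int.ofNat from groups_getD clauses b]
  have := inner_eq_writeG b (pvIdxsFrom clauses 0 b) 0 acc
  simpa using this

-- ===== VERDICT (by name: the statement is the Claim_ definition above) =====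
theorem assign_unique_ids_spec : Claim_equal_assign_unique_ids := by
  intro clauses _ _
  unfold Spec_assign_unique_ids
  rw [alt_eq_keys_fold clauses]
  unfold assign_unique_ids
  rw [a_fold_eq clauses [] PySem.Dict.empty [] (by intro b; simp [PySem.Dict.getD])]
  rw [List.nil_append]
  apply List.ext_getElem?
  intro i
  rw [assignFrom_getElem? clauses [] i]
  cases hc : clauses[i]? with
  | none =>
    rw [outer_untouched clauses _ clauses i (fun c h => by rw [hc] at h; simp at h)]
    simp [hc]
  | some c =>
    obtain ⟨hi, hci⟩ := List.getElem?_eq_some_iff.1 hc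
    have hmem : pvBaseId c ∈ PySem.Set.ofList (clauses.map pvBaseId) := by
      rw [PySem.Set.mem_ofList]
      exact List.mem_map.2 ⟨clauses[i], List.getElem_mem hi, by rw [hci]⟩
    rw [outer_written clauses _ (PySem.Set.nodup_ofList _) clauses i c hc hmem]
    rw [hc]
    simp [List.map_take]
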